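-- pv_equiv track=rewrite | github.com/daniel-reich/turbo-robot | GPodAAMFqz9sLWmAy_20.py | one_odd_one_even
-- ===== SOURCE A (Python) =====
-- def one_odd_one_even(n):
--     mylist=[]
--     count=0
--     n=[n]
--     n=int(n[0])
--     while n>0:
--         res=n%10
--         n=int(n/10)
--         mylist.append(res)
--     for i in mylist:
--         if i%2==0:
--             count+=1
--     if count==1:
--         return True
--     else:
--         return False
-- ===== SOURCE B (Python) =====
-- def one_odd_one_even(n):
--     v = int(n)
--     if v <= 0:
--         return False
--     return sum(c in "02468" for c in str(v)) == 1
-- ===== Notes on version B (the rewrite author's own statement) =====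
-- stated objective: idiomatic
-- what changed: Counts even digits by traversing the decimal string representation (most-significant digit first) with a generator sum instead of A's arithmetic modulus/trunc-division digit-stripping loop plus a second counting pass over an accumulated list.
import Mathlib
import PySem

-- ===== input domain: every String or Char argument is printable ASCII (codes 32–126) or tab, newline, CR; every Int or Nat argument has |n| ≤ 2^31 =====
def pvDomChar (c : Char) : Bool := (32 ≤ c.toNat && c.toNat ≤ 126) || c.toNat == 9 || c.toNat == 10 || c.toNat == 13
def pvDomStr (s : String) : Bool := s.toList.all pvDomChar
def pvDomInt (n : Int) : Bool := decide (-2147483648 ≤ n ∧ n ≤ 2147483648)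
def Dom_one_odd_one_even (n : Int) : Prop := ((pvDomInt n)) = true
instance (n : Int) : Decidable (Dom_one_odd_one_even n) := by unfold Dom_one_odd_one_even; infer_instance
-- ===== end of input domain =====

-- B counts even digits over str(v) (most-significant first) instead of A's %10 / int(n/10)
-- stripping loop plus a second counting pass; same return value on every int (RETURN value only).

-- ===== PORT A =====
-- the while loop: strips digits with n % 10 and n = int(n / 10) (trunc division), appending to mylist
def one_odd_one_even_go (n : Int) (mylist : List Int) : List Int :=
  if _h : n > 0 then
    one_odd_one_even_go (PySem.Int.truncdiv n 10) (mylist ++ [PySem.Int.mod n 10])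
  else mylist
termination_by n.toNat
decreasing_by
  simp only [PySem.Int.truncdiv, Int.tdiv_eq_ediv_of_nonneg (by omega : (0:Int) ≤ n)]
  omega

def one_odd_one_even (n : Int) : Bool :=
  -- mylist=[]; count=0; n=[n]; n=int(n[0])  (identity on an int argument)
  let n1 : Int := n
  let mylist : List Int := one_odd_one_even_go n1 []
  let count : Int :=
    mylist.foldl (fun count i => if PySem.Int.mod i 2 == 0 then count + 1 else count) 0
  if count == 1 then true else false

-- ===== PORT B =====
def one_odd_one_even_alt (n : Int) : Bool :=
  let v : Int := n                          -- v = int(n): identity on an int argument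
  if v ≤ 0 then false
  else
    -- sum(c in "02468" for c in str(v)) == 1
    (((PySem.Int.toStr v).toList.map
        (fun c => if c ∈ "02468".toList then (1 : Int) else 0)).sum) == 1

-- ===== PRECONDITION & SPEC =====
def Spec_one_odd_one_even (n : Int) (out : Bool) : Prop := out = one_odd_one_even_alt n
instance (n : Int) (out : Bool) : Decidable (Spec_one_odd_one_even n out) := by unfold Spec_one_odd_one_even; infer_instance

-- ===== CLAIM (what is proved, stated in full; the proofs are below) =====
def Claim_equal_one_odd_one_even : Prop := ∀ (n : Int), Dom_one_odd_one_even n → Spec_one_odd_one_even n (one_odd_one_even n)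

-- ===== LEMMAS AND PROOFS =====

-- number of even decimal digits of a positive natural, by the same /10 descent both programs take
def evenDigits (m : Nat) : Nat :=
  (if m % 2 = 0 then 1 else 0) +
    (if h : m / 10 = 0 then 0 else evenDigits (m / 10))
termination_by m
decreasing_by exact Nat.div_lt_self (by omega) (by omega)

theorem countP_go (m : Nat) (hm : 0 < m) (acc : List Int) :
    ((one_odd_one_even_go (m : Int) acc).countP
        (fun i => PySem.Int.mod i 2 == 0)) =
      acc.countP (fun i => PySem.Int.mod i 2 == 0) + evenDigits m := by
  induction m using Nat.strong_induction_on generalizing acc with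
  | _ m ih =>
    rw [one_odd_one_even_go]
    have hpos : ((m : Int) > 0) := by exact_mod_cast hm
    simp only [hpos, dif_pos]
    have htd : PySem.Int.truncdiv (m : Int) 10 = ((m / 10 : Nat) : Int) := by
      unfold PySem.Int.truncdiv
      rw [Int.tdiv_eq_ediv_of_nonneg (show (0:Int) ≤ (m:Int) by omega)]
      omega
    have hmd : PySem.Int.mod (m : Int) 10 = ((m % 10 : Nat) : Int) := by
      exact_mod_cast PySem.Int.mod_natCast m 10
    have heven : (PySem.Int.mod ((m % 10 : Nat) : Int) 2 == 0) = decide (m % 2 = 0) := by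
      rw [show PySem.Int.mod ((m % 10 : Nat) : Int) 2 = ((m % 10 % 2 : Nat) : Int) from by
        exact_mod_cast PySem.Int.mod_natCast (m % 10) 2]
      rw [show m % 10 % 2 = m % 2 from by omega]
      by_cases hp : m % 2 = 0 <;> simp [hp] <;> omega
    rw [htd, hmd]
    by_cases hz : m / 10 = 0
    · rw [hz]
      rw [show one_odd_one_even_go ((0:Nat):Int) (acc ++ [((m % 10 : Nat) : Int)]) =
            acc ++ [((m % 10 : Nat) : Int)] from by rw [one_odd_one_even_go]; simp]
      rw [List.countP_append, List.countP_singleton, heven, evenDigits]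
      simp [hz]
    · have hlt : m / 10 < m := Nat.div_lt_self hm (by omega)
      rw [ih (m / 10) hlt (by omega)]
      rw [List.countP_append, List.countP_singleton, heven]
      conv_rhs => rw [evenDigits]
      simp [hz]
      by_cases hp : m % 2 = 0 <;> simp [hp] <;> omega

theorem digitChar_even (m : Nat) :
    (decide ((Nat.digitChar (m % 10)) ∈ "02468".toList)) = decide (m % 2 = 0) := by
  have key : ∀ k, k < 10 → (decide ((Nat.digitChar k) ∈ "02468".toList)) = decide (k % 2 = 0) := by
    decide
  rw [key (m % 10) (by omega), show m % 10 % 2 = m % 2 from by omega]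

theorem countP_toDigitsCore (f : Nat) :
    ∀ (m : Nat) (ds : List Char), m < f →
      ((Nat.toDigitsCore 10 f m ds).countP (fun c => decide (c ∈ "02468".toList))) =
        evenDigits m + ds.countP (fun c => decide (c ∈ "02468".toList)) := by
  induction f with
  | zero => intro m ds h; omega
  | succ f ih =>
    intro m ds h
    simp only [Nat.toDigitsCore]
    by_cases hz : m / 10 = 0
    · rw [if_pos hz, List.countP_cons]
      conv_rhs => rw [evenDigits]
      simp only [digitChar_even m, hz, dif_pos]
      by_cases hp : m % 2 = 0 <;> simp [hp] <;> omega
    · rw [if_neg hz]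
      have hmpos : 0 < m := by omega
      have hf : m / 10 < f := lt_of_lt_of_le (Nat.div_lt_self hmpos (by omega)) (by omega)
      rw [ih (m / 10) _ hf, List.countP_cons]
      conv_rhs => rw [evenDigits]
      simp only [digitChar_even m, hz, dif_neg, not_false_iff]
      by_cases hp : m % 2 = 0 <;> simp [hp] <;> omega

-- ===== VERDICT (by name: the statement is the Claim_ definition above) =====
theorem one_odd_one_even_spec : Claim_equal_one_odd_one_even := by
  intro n _
  unfold Spec_one_odd_one_even one_odd_one_even one_odd_one_even_alt
  by_cases hn : n ≤ 0
  · -- loop body never runs; both return false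
    have hgo : one_odd_one_even_go n [] = [] := by
      rw [one_odd_one_even_go]; simp [show ¬(n > 0) by omega]
    simp [hgo, hn]
  · push Not at hn
    simp only [show ¬(n ≤ 0) by omega, if_neg, not_false_iff]
    set m := n.toNat with hm
    have hn' : (m : Int) = n := by omega
    have hmpos : 0 < m := by omega
    -- A's count
    rw [← hn']
    rw [PySem.List.foldl_count_if]
    have hA := countP_go m hmpos []
    simp only [List.countP_nil, Nat.zero_add] at hA
    rw [hA]
    -- B's sum
    have hsum := PySem.List.sum_map_ite_one_zero
      (fun c => decide (c ∈ "02468".toList)) ((PySem.Int.toStr (m : Int)).toList)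
    simp only [decide_eq_true_eq] at hsum
    rw [hsum]
    have htc : (PySem.Int.toStr (m : Int)).toList = Nat.toDigits 10 m := by
      rw [PySem.Int.toList_toStr]
      simp [PySem.Int.toChars, show ¬((m:Int) < 0) by omega]
    rw [htc]
    have hB := countP_toDigitsCore (m + 1) m [] (by omega)
    simp only [List.countP_nil, Nat.add_zero] at hB
    rw [Nat.toDigits, hB]
    by_cases h : evenDigits m = 1 <;> simp [h]
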